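-- pv_equiv track=rewrite | github.com/arianahejazyan/chess-engine | Nyx/utils/mask_methods.py | horizontal_attacks_on_fly
-- ===== SOURCE A (Python) =====
-- def horizontal_attacks_on_fly(square: int, block: int) -> int:
--     """
--     Generates a bitboard representing the horizontal attacks from a given square on a chessboard, while considering blocking pieces.
--
--     Parameters:
--         square (int): The position of the attacking piece (0-based index) on the chessboard.
--         block (int): A bitboard representing the occupied squares (0-based index) on the chessboard where the attacks may stop.
--
--     Returns:
--         int: A bitboard representing the possible attack squares along the horizontal direction from the input square while considering blocking pieces.
--
--     Note:
--         - The function assumes that the square parameter is a non-negative integer less than the number of squares on a chessboard (196 squares).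
--         - The 'block' parameter represents a bitboard where each bit set to 1 indicates an occupied square where the attack may stop.
--         - The returned bitboard represents the attack squares along the horizontal direction, considering blocking pieces along the way.
--     """
--
--     # initialize bitboard mask
--     mask = 0
--
--     # calculate file of the given square
--     f = square % 14
--
--     # generate right direction attacks
--     for d in range(1, 13 - f):
--         mask ^= (1 << square + d)
--         if (1 << square + d) & block: break
--
--     # generate left direction attacks
--     for d in range(1,f):
--         mask ^= (1 << square - d)
--         if (1 << square - d) & block: break
--
--     return mask
-- ===== SOURCE B (Python) =====
-- def horizontal_attacks_on_fly(square: int, block: int) -> int: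
--     f = square % 14
--
--     # scan each ray from the far edge toward the square: a blocker resets the
--     # accumulated segment, so what survives is exactly the squares up to (and
--     # including) the blocker nearest the square.
--     right = 0
--     for d in reversed(range(1, 13 - f)):
--         b = 1 << (square + d)
--         right = b if b & block else right | b
--
--     left = 0
--     for d in reversed(range(1, f)):
--         b = 1 << (square - d)
--         left = b if b & block else left | b
--
--     return right | left
-- ===== Notes on version B (the rewrite author's own statement) =====
-- stated objective: alternative
-- what changed: A scans each ray outward from the square with an early break at the first blocker, XOR-ing bits into a shared mask; B traverses each ray back-to-front from the board edge with a fold whose accumulator is reset at every blocker, so the surviving segment is exactly the squares up to the nearest blocker, and ORs the two segments.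
import Mathlib
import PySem

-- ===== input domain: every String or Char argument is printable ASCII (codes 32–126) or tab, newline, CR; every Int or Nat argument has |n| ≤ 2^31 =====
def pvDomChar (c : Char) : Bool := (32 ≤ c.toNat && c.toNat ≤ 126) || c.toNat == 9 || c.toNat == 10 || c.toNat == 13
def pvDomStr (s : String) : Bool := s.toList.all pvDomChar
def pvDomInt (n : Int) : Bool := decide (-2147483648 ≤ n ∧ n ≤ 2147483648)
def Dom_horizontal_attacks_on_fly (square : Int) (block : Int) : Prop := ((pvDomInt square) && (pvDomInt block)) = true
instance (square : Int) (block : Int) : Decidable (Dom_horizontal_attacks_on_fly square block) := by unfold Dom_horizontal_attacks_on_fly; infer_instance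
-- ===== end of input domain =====

-- B replaces A's two forward scans with early break by two back-to-front folds
-- (a blocker resets the accumulated segment), combined with a single OR (objective: alternative).

-- ===== PORT A =====
-- right-direction loop: mask ^= 1 << (square + d); break on blocker
def pvLoopR (square block : Int) : List Int → Int → Int
  | [], mask => mask
  | d :: rest, mask =>
      let bit : Int := 1 <<< (square + d).toNat
      let mask' := PySem.Int.bxor mask bit
      if PySem.Int.band bit block ≠ 0 then mask' else pvLoopR square block rest mask'

-- left-direction loop: mask ^= 1 << (square - d); break on blocker
def pvLoopL (square block : Int) : List Int → Int → Int
  | [], mask => mask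
  | d :: rest, mask =>
      let bit : Int := 1 <<< (square - d).toNat
      let mask' := PySem.Int.bxor mask bit
      if PySem.Int.band bit block ≠ 0 then mask' else pvLoopL square block rest mask'

def horizontal_attacks_on_fly (square : Int) (block : Int) : Int :=
  let f := PySem.Int.mod square 14
  let mask := pvLoopR square block (PySem.List.pyRange 1 (13 - f) 1) 0
  pvLoopL square block (PySem.List.pyRange 1 f 1) mask

-- ===== PORT B =====
def pvStepR (square block : Int) (acc : Int) (d : Int) : Int :=
  let b : Int := 1 <<< (square + d).toNat
  if PySem.Int.band b block ≠ 0 then b else PySem.Int.bor acc b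

def pvStepL (square block : Int) (acc : Int) (d : Int) : Int :=
  let b : Int := 1 <<< (square - d).toNat
  if PySem.Int.band b block ≠ 0 then b else PySem.Int.bor acc b

def horizontal_attacks_on_fly_alt (square : Int) (block : Int) : Int :=
  let f := PySem.Int.mod square 14
  let right := ((PySem.List.pyRange 1 (13 - f) 1).reverse).foldl (pvStepR square block) 0
  let left  := ((PySem.List.pyRange 1 f 1).reverse).foldl (pvStepL square block) 0
  PySem.Int.bor right left

-- ===== PRECONDITION & SPEC =====
-- A raises ValueError ('negative shift count') for every square < 0; it returns on all square ≥ 0.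
def Pre_horizontal_attacks_on_fly (square : Int) (block : Int) : Prop := 0 ≤ square
instance (square : Int) (block : Int) : Decidable (Pre_horizontal_attacks_on_fly square block) := by unfold Pre_horizontal_attacks_on_fly; infer_instance
def pvWitness_horizontal_attacks_on_fly : Int × Int := (17, 1048576)

def Spec_horizontal_attacks_on_fly (square : Int) (block : Int) (out : Int) : Prop := out = horizontal_attacks_on_fly_alt square block
instance (square : Int) (block : Int) (out : Int) : Decidable (Spec_horizontal_attacks_on_fly square block out) := by unfold Spec_horizontal_attacks_on_fly; infer_instance

-- ===== CLAIM (what is proved, stated in full; the proofs are below) =====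
def Claim_equal_horizontal_attacks_on_fly : Prop := ∀ (square : Int) (block : Int), Dom_horizontal_attacks_on_fly square block → Pre_horizontal_attacks_on_fly square block → Spec_horizontal_attacks_on_fly square block (horizontal_attacks_on_fly square block)

-- ===== LEMMAS AND PROOFS =====

-- Nat-valued model of A's scan-with-break over a list of bit positions
def pvScanN (block : Int) : List Nat → Nat
  | [] => 0
  | p :: rest =>
      if PySem.Int.band ((2^p : Nat) : Int) block ≠ 0 then 2^p else 2^p ^^^ pvScanN block rest

-- Nat-valued model of B's reset-fold over a list of bit positions
def pvFoldN (block : Int) (ps : List Nat) (acc : Nat) : Nat :=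
  ps.foldl (fun (a : Nat) (p : Nat) => if PySem.Int.band ((2^p : Nat) : Int) block ≠ 0 then 2^p else a ||| 2^p) acc

theorem pvshift (p : Nat) : (1:Nat) <<< p = 2^p := by
  simp [Nat.shiftLeft_eq]

theorem pvxor_or {a b : Nat} (h : a &&& b = 0) : a ^^^ b = a ||| b := by
  apply Nat.eq_of_testBit_eq
  intro i
  have := congrArg (fun x => x.testBit i) h
  simp [Nat.testBit_and] at this
  simp [Nat.testBit_xor, Nat.testBit_or]
  cases ha : a.testBit i <;> cases hb : b.testBit i <;> simp_all

theorem pvpow_and {p q : Nat} (h : p ≠ q) : (2^p) &&& (2^q) = 0 := by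
  apply Nat.eq_of_testBit_eq; intro i
  simp [Nat.testBit_and, Nat.testBit_two_pow]
  rintro rfl rfl; exact h rfl

-- a position not in the list is absent from the scan's bits
theorem pvScanN_and {block : Int} {ps : List Nat} {p : Nat} (h : p ∉ ps) :
    pvScanN block ps &&& 2^p = 0 := by
  induction ps with
  | nil => simp [pvScanN]
  | cons q rest ih =>
      have hq : q ≠ p := fun e => h (e ▸ List.mem_cons_self ..)
      have hr : p ∉ rest := fun m => h (List.mem_cons_of_mem _ m)
      simp only [pvScanN]
      split_ifs with hb
      · exact pvpow_and hq
      · rw [Nat.and_xor_distrib_right, pvpow_and hq, ih hr]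
        decide

-- two scans over disjoint position lists share no bits
theorem pvScanN_and_scan {block : Int} {ps qs : List Nat}
    (h : ∀ p, p ∈ qs → p ∉ ps) :
    pvScanN block ps &&& pvScanN block qs = 0 := by
  induction qs with
  | nil => simp [pvScanN]
  | cons q rest ih =>
      have hq := h q (List.mem_cons_self ..)
      have hr : ∀ p, p ∈ rest → p ∉ ps := fun p m => h p (List.mem_cons_of_mem _ m)
      simp only [pvScanN]
      split_ifs with hb
      · exact pvScanN_and hq
      · rw [Nat.and_xor_distrib_left, pvScanN_and hq, ih hr]
        decide

-- the back-to-front fold of B equals A's forward scan on pairwise-distinct positions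
theorem pvFoldN_reverse {block : Int} {ps : List Nat} (h : ps.Pairwise (· ≠ ·)) :
    pvFoldN block ps.reverse 0 = pvScanN block ps := by
  induction ps with
  | nil => rfl
  | cons p rest ih =>
      rcases List.pairwise_cons.mp h with ⟨hp, hrest⟩
      have hnm : p ∉ rest := fun m => (hp p m) rfl
      have step : pvFoldN block ((p :: rest).reverse) 0
          = (if PySem.Int.band ((2^p : Nat) : Int) block ≠ 0 then 2^p
             else pvFoldN block rest.reverse 0 ||| 2^p) := by
        simp only [List.reverse_cons, pvFoldN, List.foldl_append, List.foldl_cons, List.foldl_nil]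
      rw [step, ih hrest]
      simp only [pvScanN]
      split_ifs with hb
      · rfl
      · rw [← pvxor_or (pvScanN_and hnm)]
        exact Nat.xor_comm _ _

-- A's loops compute scans (accumulator threaded as XOR on a Nat-cast mask)
theorem pvLoopR_eq {square block : Int} (ds : List Int) (n : Nat) :
    pvLoopR square block ds (n : Int)
      = ((n ^^^ pvScanN block (ds.map (fun d => (square + d).toNat))) : Nat) := by
  induction ds generalizing n with
  | nil => simp [pvLoopR, pvScanN]
  | cons d rest ih =>
      simp only [pvLoopR, List.map_cons, pvScanN, pvshift]
      split_ifs with hb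
      · exact PySem.Int.bxor_natCast n _
      · rw [PySem.Int.bxor_natCast, ih]
        simp [Nat.xor_assoc]

theorem pvLoopL_eq {square block : Int} (ds : List Int) (n : Nat) :
    pvLoopL square block ds (n : Int)
      = ((n ^^^ pvScanN block (ds.map (fun d => (square - d).toNat))) : Nat) := by
  induction ds generalizing n with
  | nil => simp [pvLoopL, pvScanN]
  | cons d rest ih =>
      simp only [pvLoopL, List.map_cons, pvScanN, pvshift]
      split_ifs with hb
      · exact PySem.Int.bxor_natCast n _
      · rw [PySem.Int.bxor_natCast, ih]
        simp [Nat.xor_assoc]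

-- B's folds compute pvFoldN
theorem pvFoldR_eq {square block : Int} (ds : List Int) (n : Nat) :
    ds.foldl (pvStepR square block) (n : Int)
      = ((pvFoldN block (ds.map (fun d => (square + d).toNat)) n) : Nat) := by
  induction ds generalizing n with
  | nil => simp [pvFoldN]
  | cons d rest ih =>
      simp only [List.foldl_cons, pvStepR, List.map_cons, pvFoldN, pvshift]
      split_ifs with hb
      · exact ih _
      · rw [PySem.Int.bor_natCast, ih]
        rfl

theorem pvFoldL_eq {square block : Int} (ds : List Int) (n : Nat) :
    ds.foldl (pvStepL square block) (n : Int)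
      = ((pvFoldN block (ds.map (fun d => (square - d).toNat)) n) : Nat) := by
  induction ds generalizing n with
  | nil => simp [pvFoldN]
  | cons d rest ih =>
      simp only [List.foldl_cons, pvStepL, List.map_cons, pvFoldN, pvshift]
      split_ifs with hb
      · exact ih _
      · rw [PySem.Int.bor_natCast, ih]
        rfl

-- assembled equivalence over generic range lengths (hmL bounds the left ray inside the rank)
theorem pvMain {square block f : Int} (hsq : 0 ≤ square) (hfle : f ≤ square) (mR mL : Nat)
    (hmL : ∀ k : Nat, k < mL → (1:Int) + 1 * (k:Int) < f) :
    pvLoopL square block ((List.range mL).map (fun (k : Nat) => 1 + 1 * (k:Int)))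
      (pvLoopR square block ((List.range mR).map (fun (k : Nat) => 1 + 1 * (k:Int))) 0)
    = PySem.Int.bor
        (((List.range mR).map (fun (k : Nat) => 1 + 1 * (k:Int))).reverse.foldl (pvStepR square block) 0)
        (((List.range mL).map (fun (k : Nat) => 1 + 1 * (k:Int))).reverse.foldl (pvStepL square block) 0) := by
  have hpairR : (((List.range mR).map (fun (k : Nat) => 1 + 1 * (k:Int))).map
      (fun d => (square + d).toNat)).Pairwise (· ≠ ·) := by
    rw [List.map_map, List.pairwise_map]
    exact List.pairwise_lt_range.imp (fun {a b} hab => by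
      simp only [Function.comp]; omega)
  have hpairL : (((List.range mL).map (fun (k : Nat) => 1 + 1 * (k:Int))).map
      (fun d => (square - d).toNat)).Pairwise (· ≠ ·) := by
    rw [List.map_map]
    refine List.nodup_range.map_on ?_
    intro x hx y hy he
    simp only [List.mem_range] at hx hy
    simp only [Function.comp] at he
    have h1 := hmL x hx
    have h2 := hmL y hy
    omega
  have hdisj : ∀ p, p ∈ (((List.range mL).map (fun (k : Nat) => 1 + 1 * (k:Int))).map
      (fun d => (square - d).toNat)) →
      p ∉ (((List.range mR).map (fun (k : Nat) => 1 + 1 * (k:Int))).map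
      (fun d => (square + d).toNat)) := by
    intro p hp hmem
    simp only [List.map_map, List.mem_map, List.mem_range, Function.comp] at hp hmem
    obtain ⟨k, hk, rfl⟩ := hp
    obtain ⟨k', hk', he⟩ := hmem
    omega
  rw [show (0:Int) = ((0:Nat):Int) from rfl]
  rw [pvLoopR_eq, pvLoopL_eq, pvFoldR_eq, pvFoldL_eq, PySem.Int.bor_natCast]
  simp only [List.map_reverse]
  rw [pvFoldN_reverse hpairR, pvFoldN_reverse hpairL,
      Nat.zero_xor, pvxor_or (pvScanN_and_scan hdisj)]

-- ===== VERDICT (by name: the statement is the Claim_ definition above) =====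
theorem horizontal_attacks_on_fly_spec : Claim_equal_horizontal_attacks_on_fly := by
  intro square block _ hpre
  unfold Pre_horizontal_attacks_on_fly at hpre
  unfold Spec_horizontal_attacks_on_fly
  simp only [horizontal_attacks_on_fly, horizontal_attacks_on_fly_alt]
  have hfe : PySem.Int.mod square 14 = square % 14 := PySem.Int.mod_eq_emod_of_pos (by norm_num)
  have hfle : PySem.Int.mod square 14 ≤ square := by rw [hfe]; omega
  rw [PySem.List.pyRange_of_pos 1 (13 - PySem.Int.mod square 14) (by norm_num),
      PySem.List.pyRange_of_pos 1 (PySem.Int.mod square 14) (by norm_num)]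
  refine pvMain hpre hfle _ _ ?_
  intro k hk
  split at hk
  · omega
  · omega
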